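-- pv_equiv track=rewrite | github.com/Zd0nk/datumlyimproved | app.py | detect_blank_double_gws
-- ===== SOURCE A (Python) =====
-- def detect_blank_double_gws(fixtures, planning_gw_id, n_gws=6, teams=None):
--     """
--     Detect blank and double gameweeks from fixture data.
--     Returns: dict {team_id: {gw: fixture_count}} where 0 = blank, 2+ = double
--     """
--     if teams is None:
--         teams = {}
--
--     team_fixture_counts = {}
--     for t_id in teams:
--         team_fixture_counts[t_id] = {}
--         for gw in range(planning_gw_id, planning_gw_id + n_gws):
--             team_fixture_counts[t_id][gw] = 0
--
--     for f in fixtures: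
--         ev = f.get("event")
--         if ev and planning_gw_id <= ev < planning_gw_id + n_gws:
--             if f["team_h"] in team_fixture_counts:
--                 team_fixture_counts[f["team_h"]][ev] = team_fixture_counts[f["team_h"]].get(ev, 0) + 1
--             if f["team_a"] in team_fixture_counts:
--                 team_fixture_counts[f["team_a"]][ev] = team_fixture_counts[f["team_a"]].get(ev, 0) + 1
--
--     return team_fixture_counts
-- ===== SOURCE B (Python) =====
-- def detect_blank_double_gws(fixtures, planning_gw_id, n_gws=6, teams=None):
--     """Bucket each team's in-window events, sort them, then emit each team's row
--     by a two-pointer merge of the sorted event list with the gameweek range."""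
--     if teams is None:
--         teams = {}
--     lo = planning_gw_id
--     hi = planning_gw_id + n_gws
--     evs_by_team = {}
--     for f in fixtures:
--         ev = f.get("event")
--         if ev and lo <= ev < hi:
--             for t in (f["team_h"], f["team_a"]):
--                 if t in teams:
--                     evs_by_team.setdefault(t, []).append(ev)
--     out = {}
--     for t in teams:
--         evs = sorted(evs_by_team.get(t, []))
--         k = len(evs)
--         i = 0
--         row = {}
--         for gw in range(lo, hi):
--             c = 0
--             while i < k and evs[i] == gw:
--                 c += 1
--                 i += 1
--             row[gw] = c
--         out[t] = row
--     return out
-- ===== Notes on version B (the rewrite author's own statement) =====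
-- stated objective: alternative
-- what changed: B replaces A's zero-initialized nested dict mutated while scanning the fixtures with a sort-then-scan algorithm: it buckets each team's in-window events, sorts each bucket, and emits every team's row by a two-pointer merge of the sorted event list with the gameweek range.
import Mathlib
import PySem

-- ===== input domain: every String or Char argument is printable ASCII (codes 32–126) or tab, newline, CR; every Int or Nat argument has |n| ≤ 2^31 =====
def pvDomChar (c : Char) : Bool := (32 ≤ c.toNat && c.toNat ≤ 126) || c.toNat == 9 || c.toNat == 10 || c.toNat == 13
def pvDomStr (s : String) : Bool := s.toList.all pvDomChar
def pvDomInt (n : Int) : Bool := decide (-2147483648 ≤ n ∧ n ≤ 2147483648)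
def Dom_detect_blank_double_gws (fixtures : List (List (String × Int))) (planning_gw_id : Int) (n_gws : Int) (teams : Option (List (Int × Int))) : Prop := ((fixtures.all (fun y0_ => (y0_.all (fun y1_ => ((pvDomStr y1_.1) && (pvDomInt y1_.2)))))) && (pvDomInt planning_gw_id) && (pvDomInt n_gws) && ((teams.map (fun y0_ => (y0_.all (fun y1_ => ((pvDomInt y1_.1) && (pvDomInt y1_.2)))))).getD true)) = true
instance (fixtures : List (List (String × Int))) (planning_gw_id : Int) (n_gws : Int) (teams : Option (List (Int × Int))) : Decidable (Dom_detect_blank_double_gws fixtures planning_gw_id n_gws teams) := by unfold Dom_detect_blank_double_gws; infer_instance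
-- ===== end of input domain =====

-- B replaces A's mutable tally (a zero-initialized nested dict incremented while scanning the
-- fixtures) with sort-then-scan: it buckets each team's in-window events, sorts each bucket,
-- and emits each row by a two-pointer merge of the sorted events with the gameweek range.

-- ===== PORT A =====
-- the event of a fixture dict, f.get("event")
def pvEvent (f : List (String × Int)) : Option Int := (PySem.Dict.mk f).get? "event"

-- {gw: 0 for gw in range(planning_gw_id, planning_gw_id + n_gws)} built as A builds it
def pvA_innerInit (p n : Int) : PySem.Dict Int Int :=
  (PySem.List.pyRange p (p + n) 1).foldl (fun inner gw => inner.insert gw 0) PySem.Dict.empty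

-- one 'if f[side] in team_fixture_counts: …[ev] = ….get(ev, 0) + 1' update
def pvA_bump (d : PySem.Dict Int (PySem.Dict Int Int)) (ev t : Int) : PySem.Dict Int (PySem.Dict Int Int) :=
  if d.contains t then d.modify t PySem.Dict.empty (fun inner => inner.insert ev (inner.getD ev 0 + 1)) else d

-- the body of A's 'for f in fixtures' loop; f["team_h"]/f["team_a"] are total via getD 0,
-- Pre_ excludes fixtures where Python would raise KeyError on these subscripts
def pvA_step (p n : Int) (d : PySem.Dict Int (PySem.Dict Int Int)) (f : List (String × Int)) :
    PySem.Dict Int (PySem.Dict Int Int) :=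
  match pvEvent f with
  | none => d
  | some ev =>
    if ev ≠ 0 ∧ p ≤ ev ∧ ev < p + n then
      pvA_bump (pvA_bump d ev (((PySem.Dict.mk f).get? "team_h").getD 0)) ev
        (((PySem.Dict.mk f).get? "team_a").getD 0)
    else d

def detect_blank_double_gws (fixtures : List (List (String × Int))) (planning_gw_id : Int) (n_gws : Int) (teams : Option (List (Int × Int))) : List (Int × List (Int × Int)) :=
  -- 'for t_id in teams': iteration over the dict's keys, first occurrences in order
  let tids := PySem.List.dedup ((teams.getD []).map Prod.fst)
  let init := tids.foldl (fun d t => d.insert t (pvA_innerInit planning_gw_id n_gws)) PySem.Dict.empty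
  ((fixtures.foldl (pvA_step planning_gw_id n_gws) init).items).map (fun q => (q.1, q.2.items))

-- ===== PORT B =====
-- f.get("event") (B's own copy of the accessor)
def pvB_event (f : List (String × Int)) : Option Int := (PySem.Dict.mk f).get? "event"

-- the body of B's bucketing loop 'for f in fixtures: … evs_by_team.setdefault(t, []).append(ev)';
-- the team subscripts are total via getD 0, Pre_ excludes the fixtures where Python raises KeyError
def pvB_collect (p n : Int) (tids : List Int) (d : PySem.Dict Int (List Int))
    (f : List (String × Int)) : PySem.Dict Int (List Int) :=
  match pvB_event f with
  | none => d
  | some ev =>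
    if ev ≠ 0 ∧ p ≤ ev ∧ ev < p + n then
      [((PySem.Dict.mk f).get? "team_h").getD 0, ((PySem.Dict.mk f).get? "team_a").getD 0].foldl
        (fun d t => if tids.contains t then d.modify t [] (· ++ [ev]) else d) d
    else d

-- 'while i < k and evs[i] == gw: c += 1; i += 1' (c, i are the loop's state)
def pvB_sweep (evs : List Int) (k gw : Int) (c i : Int) : Int × Int :=
  if h : i < k ∧ PySem.List.pyGet? evs i = some gw then
    pvB_sweep evs k gw (c + 1) (i + 1)
  else (c, i)
termination_by (k - i).toNat
decreasing_by omega

-- one iteration of 'for gw in range(lo, hi)': run the while loop, then 'row[gw] = c'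
def pvB_rowStep (evs : List Int) (k : Int) (st : Int × PySem.Dict Int Int) (gw : Int) :
    Int × PySem.Dict Int Int :=
  match pvB_sweep evs k gw 0 st.1 with
  | (c, i') => (i', st.2.insert gw c)

-- the body of 'for t in teams': 'evs = sorted(evs_by_team.get(t, [])); k = len(evs); i = 0; row = {}; …'
def pvB_teamRow (p n : Int) (evd : PySem.Dict Int (List Int)) (t : Int) : PySem.Dict Int Int :=
  let evs := PySem.List.sorted (evd.getD t []) (fun x => x) false
  let k : Int := (evs.length : Int)
  ((PySem.List.pyRange p (p + n) 1).foldl (pvB_rowStep evs k) ((0 : Int), (PySem.Dict.empty : PySem.Dict Int Int))).2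

def detect_blank_double_gws_alt (fixtures : List (List (String × Int))) (planning_gw_id : Int) (n_gws : Int) (teams : Option (List (Int × Int))) : List (Int × List (Int × Int)) :=
  let tids := PySem.List.dedup ((teams.getD []).map Prod.fst)
  let evd := fixtures.foldl (pvB_collect planning_gw_id n_gws tids) PySem.Dict.empty
  let out := tids.foldl (fun od t => od.insert t (pvB_teamRow planning_gw_id n_gws evd t)) PySem.Dict.empty
  out.items.map (fun q => (q.1, q.2.items))

-- ===== PRECONDITION & SPEC =====
-- true iff A's fixture guard fires for f, so that f["team_h"] / f["team_a"] are subscripted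
def pvNeedsTeams (p n : Int) (f : List (String × Int)) : Bool :=
  match pvEvent f with
  | some ev => decide (ev ≠ 0 ∧ p ≤ ev ∧ ev < p + n)
  | none => false

-- Pre_ excludes exactly the inputs where Python A raises KeyError: a fixture whose event lies in
-- the planning window but which lacks the "team_h" or "team_a" key.
def Pre_detect_blank_double_gws (fixtures : List (List (String × Int))) (planning_gw_id : Int) (n_gws : Int) (teams : Option (List (Int × Int))) : Prop :=
  ∀ f ∈ fixtures, pvNeedsTeams planning_gw_id n_gws f = true →
    ((PySem.Dict.mk f).contains "team_h" = true ∧ (PySem.Dict.mk f).contains "team_a" = true)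
instance (fixtures : List (List (String × Int))) (planning_gw_id : Int) (n_gws : Int) (teams : Option (List (Int × Int))) : Decidable (Pre_detect_blank_double_gws fixtures planning_gw_id n_gws teams) := by unfold Pre_detect_blank_double_gws; infer_instance

def pvWitness_detect_blank_double_gws : (List (List (String × Int))) × Int × Int × (Option (List (Int × Int))) :=
  ([[("event", 1), ("team_h", 1), ("team_a", 2)], [("event", 2), ("team_h", 2), ("team_a", 3)]],
   1, 2, some [(1, 0), (2, 0)])

def Spec_detect_blank_double_gws (fixtures : List (List (String × Int))) (planning_gw_id : Int) (n_gws : Int) (teams : Option (List (Int × Int))) (out : List (Int × List (Int × Int))) : Prop := out = detect_blank_double_gws_alt fixtures planning_gw_id n_gws teams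
instance (fixtures : List (List (String × Int))) (planning_gw_id : Int) (n_gws : Int) (teams : Option (List (Int × Int))) (out : List (Int × List (Int × Int))) : Decidable (Spec_detect_blank_double_gws fixtures planning_gw_id n_gws teams out) := by unfold Spec_detect_blank_double_gws; infer_instance

-- ===== CLAIM (what is proved, stated in full; the proofs are below) =====
def Claim_equal_detect_blank_double_gws : Prop := ∀ (fixtures : List (List (String × Int))) (planning_gw_id : Int) (n_gws : Int) (teams : Option (List (Int × Int))), Dom_detect_blank_double_gws fixtures planning_gw_id n_gws teams → Pre_detect_blank_double_gws fixtures planning_gw_id n_gws teams → Spec_detect_blank_double_gws fixtures planning_gw_id n_gws teams (detect_blank_double_gws fixtures planning_gw_id n_gws teams)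
-- ===== LEMMAS AND PROOFS =====

-- the per-fixture contribution of f to the count of team t in gameweek gw
def pvContrib (f : List (String × Int)) (t gw : Int) : Int :=
  if pvB_event f = some gw ∧ gw ≠ 0 then
    (if ((PySem.Dict.mk f).get? "team_h").getD 0 = t then 1 else 0)
    + (if ((PySem.Dict.mk f).get? "team_a").getD 0 = t then 1 else 0)
  else 0

-- the reference count: A's cell value, used only by the proofs
def pvCnt (fixtures : List (List (String × Int))) (t gw : Int) : Int :=
  (fixtures.filter (fun f => decide (pvB_event f = some gw) && decide (gw ≠ 0))).foldl
    (fun acc f => acc + (if ((PySem.Dict.mk f).get? "team_h").getD 0 = t then 1 else 0)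
                      + (if ((PySem.Dict.mk f).get? "team_a").getD 0 = t then 1 else 0)) 0

lemma pv_foldl_shift (l : List (List (String × Int))) (t : Int) (a : Int) :
    l.foldl (fun acc f => acc + (if ((PySem.Dict.mk f).get? "team_h").getD 0 = t then 1 else 0)
                      + (if ((PySem.Dict.mk f).get? "team_a").getD 0 = t then 1 else 0)) a
      = a + l.foldl (fun acc f => acc + (if ((PySem.Dict.mk f).get? "team_h").getD 0 = t then 1 else 0)
                      + (if ((PySem.Dict.mk f).get? "team_a").getD 0 = t then 1 else 0)) 0 := by
  induction l generalizing a with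
  | nil => simp
  | cons f rest ih =>
    simp only [List.foldl_cons]
    rw [ih, ih (0 + _ + _)]
    ring

lemma pvCnt_nil (t gw : Int) : pvCnt [] t gw = 0 := rfl

lemma pvCnt_cons (f : List (String × Int)) (fs : List (List (String × Int))) (t gw : Int) :
    pvCnt (f :: fs) t gw = pvContrib f t gw + pvCnt fs t gw := by
  unfold pvCnt pvContrib
  by_cases h : pvB_event f = some gw ∧ gw ≠ 0
  · rw [if_pos h]
    have : (f :: fs).filter (fun f => decide (pvB_event f = some gw) && decide (gw ≠ 0))
        = f :: fs.filter (fun f => decide (pvB_event f = some gw) && decide (gw ≠ 0)) := by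
      simp [List.filter, h.1, h.2]
    rw [this, List.foldl_cons, pv_foldl_shift]
    ring
  · rw [if_neg h]
    have hcond : (decide (pvB_event f = some gw) && decide (gw ≠ 0)) = false := by
      simp only [Bool.and_eq_false_iff, decide_eq_false_iff_not]
      tauto
    simp only [List.filter_cons, hcond, Bool.false_eq_true, if_false]
    ring

-- the invariant tying A's nested dict d to a count function cnt, on the cells B reads
def pvInv (p n : Int) (tids : List Int) (d : PySem.Dict Int (PySem.Dict Int Int))
    (cnt : Int → Int → Int) : Prop :=
  d.keys = tids ∧
  (∀ t ∈ tids, (d.getD t PySem.Dict.empty).keys = PySem.List.pyRange p (p + n) 1) ∧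
  (∀ t ∈ tids, ∀ gw ∈ PySem.List.pyRange p (p + n) 1, (d.getD t PySem.Dict.empty).getD gw 0 = cnt t gw)

lemma pvInv_congr (p n : Int) (tids : List Int) (d : PySem.Dict Int (PySem.Dict Int Int))
    (cnt cnt' : Int → Int → Int) (h : pvInv p n tids d cnt)
    (he : ∀ t gw : Int, cnt t gw = cnt' t gw) : pvInv p n tids d cnt' := by
  exact ⟨h.1, h.2.1, fun t ht gw hg => by rw [h.2.2 t ht gw hg, he]⟩

lemma pvInv_bump (p n : Int) (tids : List Int) (d : PySem.Dict Int (PySem.Dict Int Int))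
    (cnt : Int → Int → Int) (ev tm : Int) (hev : p ≤ ev ∧ ev < p + n)
    (h : pvInv p n tids d cnt) :
    pvInv p n tids (pvA_bump d ev tm)
      (fun t gw => cnt t gw + (if tm = t ∧ gw = ev then 1 else 0)) := by
  obtain ⟨hk, hik, hv⟩ := h
  have hcont : d.contains tm = tids.contains tm := by
    rw [PySem.Dict.contains_eq_decide_mem_keys, hk]; simp
  unfold pvA_bump
  rw [hcont]
  by_cases ht : tids.contains tm
  · simp only [ht, if_true]
    have htmem : tm ∈ tids := by simpa using ht
    have hinner_keys := hik tm htmem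
    have hcontev : (d.getD tm PySem.Dict.empty).contains ev = true := by
      rw [PySem.Dict.contains_eq_decide_mem_keys, hinner_keys]
      simp [PySem.List.mem_pyRange_one, hev.1, hev.2]
    have hdcont : d.contains tm = true := by rw [hcont]; exact ht
    refine ⟨?_, ?_, ?_⟩
    · rw [PySem.Dict.keys_modify, PySem.Dict.keys_insert_of_contains _ _ hdcont, hk]
    · intro t' ht'
      by_cases h' : t' = tm
      · subst h'
        rw [PySem.Dict.getD_modify_self, PySem.Dict.keys_insert_of_contains _ _ hcontev,
          hinner_keys]
      · rw [PySem.Dict.getD_modify_of_ne _ _ _ h']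
        exact hik t' ht'
    · intro t' ht' gw hg
      by_cases h' : t' = tm
      · subst h'
        rw [PySem.Dict.getD_modify_self]
        by_cases hgw : gw = ev
        · subst hgw
          rw [PySem.Dict.getD_insert_self, hv _ ht' _ hg]
          simp
        · rw [PySem.Dict.getD_insert_of_ne _ _ _ hgw, hv _ ht' _ hg]
          simp [hgw]
      · rw [PySem.Dict.getD_modify_of_ne _ _ _ h', hv _ ht' _ hg]
        have hc : ¬ (tm = t' ∧ gw = ev) := fun hc => h' hc.1.symm
        simp [hc]
  · have hf : tids.contains tm = false := by simpa using ht
    rw [hf]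
    simp only [Bool.false_eq_true, if_false]
    refine ⟨hk, hik, ?_⟩
    intro t' ht' gw hg
    rw [hv _ ht' _ hg]
    have hc : ¬ (tm = t' ∧ gw = ev) := fun hc =>
      (by simpa using ht : ¬ tm ∈ tids) (hc.1 ▸ ht')
    simp [hc]

lemma pvInv_step (p n : Int) (tids : List Int) (d : PySem.Dict Int (PySem.Dict Int Int))
    (cnt : Int → Int → Int) (f : List (String × Int)) (h : pvInv p n tids d cnt) :
    pvInv p n tids (pvA_step p n d f) (fun t gw => cnt t gw + pvContrib f t gw) := by
  unfold pvA_step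
  have hbe : pvB_event f = pvEvent f := rfl
  cases hev : pvEvent f with
  | none =>
    refine ⟨h.1, h.2.1, ?_⟩
    intro t ht gw hg
    rw [h.2.2 t ht gw hg]
    simp [pvContrib, hbe, hev]
  | some ev =>
    dsimp only
    by_cases hg : ev ≠ 0 ∧ p ≤ ev ∧ ev < p + n
    · rw [if_pos hg]
      have h2 := pvInv_bump p n tids _ _ ev (((PySem.Dict.mk f).get? "team_a").getD 0) hg.2
        (pvInv_bump p n tids d cnt ev (((PySem.Dict.mk f).get? "team_h").getD 0) hg.2 h)
      refine ⟨h2.1, h2.2.1, ?_⟩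
      intro t ht gw hgw
      rw [h2.2.2 t ht gw hgw]
      unfold pvContrib
      rw [hbe, hev]
      dsimp only
      by_cases hge : gw = ev
      · subst hge
        have hc : (some gw = some gw ∧ gw ≠ 0) := ⟨rfl, hg.1⟩
        rw [if_pos hc]
        simp only [and_true]
        ring
      · have hne : ¬ (some ev = some gw ∧ gw ≠ 0) := fun hc => hge (Option.some.inj hc.1).symm
        have h1 : ∀ x : ℤ, ¬ (x = t ∧ gw = ev) := fun x hc => hge hc.2
        rw [if_neg hne]
        simp [h1]
    · rw [if_neg hg]
      refine ⟨h.1, h.2.1, ?_⟩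
      intro t ht gw hgw
      rw [h.2.2 t ht gw hgw]
      dsimp only
      have hr := (PySem.List.mem_pyRange_one).mp hgw
      have : ¬ (pvB_event f = some gw ∧ gw ≠ 0) := by
        rw [hbe, hev]
        rintro ⟨he, hz⟩
        have : ev = gw := by simpa using he
        subst this
        exact hg ⟨hz, hr.1, hr.2⟩
      simp [pvContrib, this]

lemma pvInv_foldl (p n : Int) (tids : List Int) (fixtures : List (List (String × Int)))
    (d : PySem.Dict Int (PySem.Dict Int Int)) (cnt : Int → Int → Int)
    (h : pvInv p n tids d cnt) :
    pvInv p n tids (fixtures.foldl (pvA_step p n) d)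
      (fun t gw => cnt t gw + pvCnt fixtures t gw) := by
  induction fixtures generalizing d cnt with
  | nil => exact pvInv_congr p n tids d cnt _ h (fun t gw => by rw [pvCnt_nil]; ring)
  | cons f rest ih =>
    have h1 := ih _ _ (pvInv_step p n tids d cnt f h)
    exact pvInv_congr p n tids _ _ _ h1 (fun t gw => by rw [pvCnt_cons]; ring)

lemma pvA_innerInit_items (p n : Int) :
    (pvA_innerInit p n).items = (PySem.List.pyRange p (p + n) 1).map (fun gw => (gw, (0 : Int))) := by
  unfold pvA_innerInit
  have h := PySem.Dict.items_foldl_insert_fresh (PySem.List.pyRange p (p + n) 1)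
    (fun x => x) (fun _ => (0 : Int)) PySem.Dict.empty
    (by intro a _; simp) (by simpa using PySem.List.nodup_pyRange_one p (p + n))
  simpa using h

lemma pvA_init_items (p n : Int) (tids : List Int) (hnd : tids.Nodup) :
    (tids.foldl (fun d t => d.insert t (pvA_innerInit p n)) PySem.Dict.empty).items
      = tids.map (fun t => (t, pvA_innerInit p n)) := by
  have h := PySem.Dict.items_foldl_insert_fresh tids (fun x => x)
    (fun _ => pvA_innerInit p n) PySem.Dict.empty
    (by intro a _; simp) (by simpa using hnd)
  simpa using h

lemma pvInv_init (p n : Int) (tids : List Int) (hnd : tids.Nodup) :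
    pvInv p n tids (tids.foldl (fun d t => d.insert t (pvA_innerInit p n)) PySem.Dict.empty)
      (fun _ _ => 0) := by
  have hitems := pvA_init_items p n tids hnd
  have hkeys : (tids.foldl (fun d t => d.insert t (pvA_innerInit p n)) PySem.Dict.empty).keys = tids := by
    rw [PySem.Dict.keys, hitems]; simp [Function.comp_def]
  have hknd : (tids.foldl (fun d t => d.insert t (pvA_innerInit p n)) PySem.Dict.empty).keys.Nodup := by
    rw [hkeys]; exact hnd
  have hinner_keys : (pvA_innerInit p n).keys = PySem.List.pyRange p (p + n) 1 := by
    rw [PySem.Dict.keys, pvA_innerInit_items]; simp [Function.comp_def]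
  have hgetD : ∀ t ∈ tids,
      (tids.foldl (fun d t => d.insert t (pvA_innerInit p n)) PySem.Dict.empty).getD t PySem.Dict.empty
        = pvA_innerInit p n := by
    intro t ht
    exact PySem.Dict.getD_of_mem_items _ (by rw [hitems]; exact List.mem_map_of_mem ht) hknd _
  refine ⟨hkeys, ?_, ?_⟩
  · intro t ht; rw [hgetD t ht, hinner_keys]
  · intro t ht gw hg
    rw [hgetD t ht]
    exact PySem.Dict.getD_of_mem_items _ (by rw [pvA_innerInit_items]; exact List.mem_map_of_mem hg)
      (by rw [hinner_keys]; exact PySem.List.nodup_pyRange_one p (p + n)) _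

-- ---- B side: the bucketing loop ----

-- the events f contributes to team t's bucket
def pvHitsEv (p n : Int) (tids : List Int) (t : Int) (f : List (String × Int)) : List Int :=
  match pvEvent f with
  | none => []
  | some ev =>
    if ev ≠ 0 ∧ p ≤ ev ∧ ev < p + n then
      (if tids.contains (((PySem.Dict.mk f).get? "team_h").getD 0)
          ∧ ((PySem.Dict.mk f).get? "team_h").getD 0 = t then [ev] else [])
      ++ (if tids.contains (((PySem.Dict.mk f).get? "team_a").getD 0)
          ∧ ((PySem.Dict.mk f).get? "team_a").getD 0 = t then [ev] else [])
    else []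

lemma pvB_collect1 (tids : List Int) (ev : Int) (d : PySem.Dict Int (List Int)) (x t : Int) :
    ((if tids.contains x then d.modify x [] (· ++ [ev]) else d) : PySem.Dict Int (List Int)).getD t []
      = d.getD t [] ++ (if tids.contains x ∧ x = t then [ev] else []) := by
  by_cases hx : tids.contains x
  · rw [if_pos hx, PySem.Dict.getD_modify]
    by_cases he : t = x
    · rw [if_pos he, if_pos (⟨hx, he.symm⟩ : tids.contains x = true ∧ x = t), he]
    · rw [if_neg he, if_neg (fun hc : tids.contains x = true ∧ x = t => he hc.2.symm),
        List.append_nil]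
  · rw [if_neg hx, if_neg (fun hc : tids.contains x = true ∧ x = t => hx hc.1),
      List.append_nil]

lemma pvB_collect_getD (p n : Int) (tids : List Int) (d : PySem.Dict Int (List Int))
    (f : List (String × Int)) (t : Int) :
    (pvB_collect p n tids d f).getD t [] = d.getD t [] ++ pvHitsEv p n tids t f := by
  unfold pvB_collect pvHitsEv
  have hbe : pvB_event f = pvEvent f := rfl
  rw [hbe]
  cases pvEvent f with
  | none => simp
  | some ev =>
    dsimp only
    by_cases hg : ev ≠ 0 ∧ p ≤ ev ∧ ev < p + n
    · rw [if_pos hg, if_pos hg, List.foldl_cons, List.foldl_cons, List.foldl_nil,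
        pvB_collect1, pvB_collect1, List.append_assoc]
    · rw [if_neg hg, if_neg hg, List.append_nil]

lemma pvB_collect_foldl (p n : Int) (tids : List Int) (fs : List (List (String × Int)))
    (d : PySem.Dict Int (List Int)) (t : Int) :
    (fs.foldl (pvB_collect p n tids) d).getD t []
      = d.getD t [] ++ fs.flatMap (pvHitsEv p n tids t) := by
  induction fs generalizing d with
  | nil => simp
  | cons f rest ih =>
    rw [List.foldl_cons, ih, pvB_collect_getD, List.flatMap_cons, List.append_assoc]

lemma pvHitsEv_count (p n : Int) (tids : List Int) (t : Int) (ht : t ∈ tids)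
    (f : List (String × Int)) (gw : Int) (hgw : gw ∈ PySem.List.pyRange p (p + n) 1) :
    (((pvHitsEv p n tids t f).count gw : ℕ) : ℤ) = pvContrib f t gw := by
  unfold pvHitsEv pvContrib
  have hbe : pvB_event f = pvEvent f := rfl
  rw [hbe]
  have hct : tids.contains t = true := by simpa using ht
  cases hev : pvEvent f with
  | none => simp
  | some ev =>
    dsimp only
    by_cases hg : ev ≠ 0 ∧ p ≤ ev ∧ ev < p + n
    · rw [if_pos hg]
      by_cases he : ev = gw
      · subst he
        rw [if_pos (⟨rfl, hg.1⟩ : some ev = some ev ∧ ev ≠ 0)]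
        by_cases h1 : ((PySem.Dict.mk f).get? "team_h").getD 0 = t <;>
          by_cases h2 : ((PySem.Dict.mk f).get? "team_a").getD 0 = t
        · have c1 : tids.contains (((PySem.Dict.mk f).get? "team_h").getD 0) = true := by
            rw [h1]; exact hct
          have c2 : tids.contains (((PySem.Dict.mk f).get? "team_a").getD 0) = true := by
            rw [h2]; exact hct
          rw [if_pos ⟨c1, h1⟩, if_pos ⟨c2, h2⟩]
          simp [h1, h2, List.count_cons]
        · have c1 : tids.contains (((PySem.Dict.mk f).get? "team_h").getD 0) = true := by
            rw [h1]; exact hct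
          rw [if_pos ⟨c1, h1⟩, if_neg (fun hc => h2 hc.2)]
          simp [h1, h2, List.count_cons]
        · have c2 : tids.contains (((PySem.Dict.mk f).get? "team_a").getD 0) = true := by
            rw [h2]; exact hct
          rw [if_neg (fun hc => h1 hc.2), if_pos ⟨c2, h2⟩]
          simp [h1, h2, List.count_cons]
        · rw [if_neg (fun hc => h1 hc.2), if_neg (fun hc => h2 hc.2)]
          simp [h1, h2]
      · have hne : ¬ (some ev = some gw ∧ gw ≠ 0) := fun hc => he (Option.some.inj hc.1)
        rw [if_neg hne]
        have hcnt : ∀ l : List Int, l = [ev] ∨ l = [] → l.count gw = 0 := by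
          rintro l (rfl | rfl) <;> simp [List.count_cons, he]
        rw [List.count_append,
          hcnt _ (by split_ifs <;> simp), hcnt _ (by split_ifs <;> simp)]
        simp
    · rw [if_neg hg]
      have hr := (PySem.List.mem_pyRange_one).mp hgw
      have hne : ¬ (some ev = some gw ∧ gw ≠ 0) := by
        rintro ⟨he, hz⟩
        exact hg ⟨(Option.some.inj he) ▸ hz, (Option.some.inj he) ▸ hr.1, (Option.some.inj he) ▸ hr.2⟩
      rw [if_neg hne]
      simp

lemma pvHits_count (p n : Int) (tids : List Int) (t : Int) (ht : t ∈ tids)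
    (fs : List (List (String × Int))) (gw : Int) (hgw : gw ∈ PySem.List.pyRange p (p + n) 1) :
    (((fs.flatMap (pvHitsEv p n tids t)).count gw : ℕ) : ℤ) = pvCnt fs t gw := by
  induction fs with
  | nil => rw [pvCnt_nil]; simp
  | cons f rest ih =>
    rw [List.flatMap_cons, List.count_append, pvCnt_cons]
    push_cast
    rw [ih, pvHitsEv_count p n tids t ht f gw hgw]

lemma pvHits_ge (p n : Int) (tids : List Int) (t : Int) (fs : List (List (String × Int))) :
    ∀ x ∈ fs.flatMap (pvHitsEv p n tids t), p ≤ x := by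
  intro x hx
  obtain ⟨f, _, hxf⟩ := List.mem_flatMap.mp hx
  unfold pvHitsEv at hxf
  cases hev : pvEvent f with
  | none => rw [hev] at hxf; simp at hxf
  | some ev =>
    rw [hev] at hxf
    dsimp only at hxf
    by_cases hg : ev ≠ 0 ∧ p ≤ ev ∧ ev < p + n
    · rw [if_pos hg] at hxf
      have : x = ev := by
        rcases List.mem_append.mp hxf with h | h <;> revert h <;> split_ifs <;> simp_all
      exact this ▸ hg.2.1
    · rw [if_neg hg] at hxf; simp at hxf

-- ---- B side: the two-pointer merge ----

lemma pvB_sweep_spec (evs : List Int) (gw : Int) :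
    ∀ (fuel : ℕ) (c i : Int), (((evs.length : Int)) - i).toNat = fuel → 0 ≤ i →
    evs.Pairwise (· ≤ ·) →
    (∀ (j : ℕ) (hj : j < evs.length), i ≤ (j : Int) → gw ≤ evs[j]) →
    pvB_sweep evs (evs.length : Int) gw c i
        = (c + (((evs.drop i.toNat).count gw : ℕ) : ℤ), i + (((evs.drop i.toNat).count gw : ℕ) : ℤ))
    ∧ (∀ (j : ℕ) (hj : j < evs.length), i ≤ (j : Int) →
        (j : Int) < i + (((evs.drop i.toNat).count gw : ℕ) : ℤ) → evs[j] = gw)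
    ∧ (∀ (j : ℕ) (hj : j < evs.length),
        i + (((evs.drop i.toNat).count gw : ℕ) : ℤ) ≤ (j : Int) → gw < evs[j]) := by
  intro fuel
  induction fuel with
  | zero =>
    intro c i hfuel hi0 _ _
    have hik : ¬ i < (evs.length : Int) := by omega
    rw [pvB_sweep, dif_neg (fun hc => hik hc.1)]
    have hdrop : evs.drop i.toNat = [] := List.drop_eq_nil_of_le (by omega)
    rw [hdrop]
    refine ⟨by simp, ?_, ?_⟩
    · intro j hj _ hlt; simp at hlt; omega
    · intro j hj hge; simp at hge; omega
  | succ fuel ih =>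
    intro c i hfuel hi0 hsor hge
    by_cases hik : i < (evs.length : Int)
    · have hmlt : i.toNat < evs.length := by omega
      have hgetI : PySem.List.pyGet? evs i = some evs[i.toNat] := by
        have h1 : i = ((i.toNat : ℕ) : Int) := by omega
        conv_lhs => rw [h1]
        rw [PySem.List.pyGet?_natCast]
        exact List.getElem?_eq_getElem hmlt
      by_cases heq : evs[i.toNat] = gw
      · -- consume one element
        have hcond : i < (evs.length : Int) ∧ PySem.List.pyGet? evs i = some gw :=
          ⟨hik, by rw [hgetI, heq]⟩
        rw [pvB_sweep, dif_pos hcond]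
        have hdrop : evs.drop i.toNat = evs[i.toNat] :: evs.drop (i.toNat + 1) :=
          (List.getElem_cons_drop hmlt).symm
        have htn : (i + 1).toNat = i.toNat + 1 := by omega
        have hcnt : ((evs.drop i.toNat).count gw : ℕ) = (evs.drop (i + 1).toNat).count gw + 1 := by
          rw [hdrop, htn, List.count_cons, heq]
          simp
        have hge' : ∀ (j : ℕ) (hj : j < evs.length), i + 1 ≤ (j : Int) → gw ≤ evs[j] := by
          intro j hj hj1; exact hge j hj (by omega)
        obtain ⟨h1, h2, h3⟩ := ih (c + 1) (i + 1) (by omega) (by omega) hsor hge'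
        refine ⟨?_, ?_, ?_⟩
        · rw [h1, Prod.mk.injEq]
          constructor <;> (rw [hcnt]; push_cast; ring)
        · intro j hj hij hlt
          by_cases hji : (j : Int) = i
          · have : j = i.toNat := by omega
            exact this ▸ heq
          · exact h2 j hj (by omega) (by push_cast [hcnt] at hlt ⊢; omega)
        · intro j hj hgej
          exact h3 j hj (by push_cast [hcnt] at hgej ⊢; omega)
      · -- stop: current element differs (and is > gw)
        have hcond : ¬ (i < (evs.length : Int) ∧ PySem.List.pyGet? evs i = some gw) := by
          rintro ⟨_, hc⟩
          rw [hgetI] at hc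
          exact heq (Option.some.inj hc)
        rw [pvB_sweep, dif_neg hcond]
        have hgt : gw < evs[i.toNat] :=
          lt_of_le_of_ne (hge i.toNat hmlt (by omega)) (fun he => heq he.symm)
        have hmono : ∀ (j : ℕ) (hj : j < evs.length), i.toNat ≤ j → evs[i.toNat] ≤ evs[j] := by
          intro j hj hij
          rcases Nat.eq_or_lt_of_le hij with h | h
          · subst h; exact le_refl _
          · exact (List.pairwise_iff_getElem.mp hsor) i.toNat j hmlt hj h
        have hcnt0 : (evs.drop i.toNat).count gw = 0 := by
          rw [List.count_eq_zero]
          intro hmem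
          obtain ⟨j, hj, hje⟩ := List.getElem_of_mem hmem
          have hld : (evs.drop i.toNat).length = evs.length - i.toNat := List.length_drop
          rw [List.getElem_drop] at hje
          have := hmono (i.toNat + j) (by omega) (by omega)
          omega
        rw [hcnt0]
        refine ⟨by simp, ?_, ?_⟩
        · intro j hj _ hlt; simp at hlt; omega
        · intro j hj hgej
          have : gw < evs[i.toNat] := hgt
          calc gw < evs[i.toNat] := hgt
            _ ≤ evs[j] := hmono j hj (by omega)
    · have hfz : False := by omega
      exact absurd hfuel (by omega)

lemma pv_count_take_zero (evs : List Int) (gw : Int) (i : Int) (hi0 : 0 ≤ i)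
    (h : ∀ (j : ℕ) (hj : j < evs.length), (j : Int) < i → evs[j] < gw) :
    (evs.take i.toNat).count gw = 0 := by
  rw [List.count_eq_zero]
  intro hmem
  obtain ⟨j, hj, hje⟩ := List.getElem_of_mem hmem
  simp only [List.length_take] at hj
  have hjl : j < evs.length := by omega
  have hji : (j : Int) < i := by omega
  rw [List.getElem_take] at hje
  have := h j hjl hji
  omega

lemma pvB_row_fold (evs : List Int) (hsor : evs.Pairwise (· ≤ ·)) (b : Int) :
    ∀ (m : ℕ) (a i : Int) (d : PySem.Dict Int Int), (b - a).toNat = m → 0 ≤ i →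
    (∀ (j : ℕ) (hj : j < evs.length), (j : Int) < i → evs[j] < a) →
    (∀ (j : ℕ) (hj : j < evs.length), i ≤ (j : Int) → a ≤ evs[j]) →
    ((PySem.List.pyRange a b 1).foldl (pvB_rowStep evs (evs.length : Int)) (i, d)).2
      = (PySem.List.pyRange a b 1).foldl (fun d gw => d.insert gw ((evs.count gw : ℕ) : ℤ)) d := by
  intro m
  induction m with
  | zero =>
    intro a i d hm _ _ _
    rw [PySem.List.pyRange_one_eq_nil (by omega)]
    simp
  | succ m ih =>
    intro a i d hm hi0 hlt hge
    by_cases hab : a < b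
    · rw [PySem.List.pyRange_one_cons hab, List.foldl_cons, List.foldl_cons]
      obtain ⟨h1, h2, h3⟩ := pvB_sweep_spec evs a ((evs.length : Int) - i).toNat 0 i rfl hi0 hsor hge
      have hcc : (evs.drop i.toNat).count a = evs.count a := by
        conv_rhs => rw [← List.take_append_drop i.toNat evs]
        rw [List.count_append, pv_count_take_zero evs a i hi0 hlt]
        simp
      have hstep : pvB_rowStep evs (evs.length : Int) (i, d) a
          = (i + ((evs.count a : ℕ) : ℤ), d.insert a ((evs.count a : ℕ) : ℤ)) := by
        unfold pvB_rowStep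
        rw [h1, hcc]
        simp
      rw [hstep]
      exact ih (a + 1) (i + ((evs.count a : ℕ) : ℤ)) (d.insert a ((evs.count a : ℕ) : ℤ))
        (by omega) (by omega)
        (by
          intro j hj hjlt
          by_cases hji : (j : Int) < i
          · have := hlt j hj hji; omega
          · have := h2 j hj (by omega) (by rw [hcc] at *; omega)
            omega)
        (by
          intro j hj hjge
          have := h3 j hj (by rw [hcc] at *; omega)
          omega)
    · rw [PySem.List.pyRange_one_eq_nil (by omega)]
      simp

-- ---- assembling B ----

lemma pvB_teamRow_items (p n : Int) (tids : List Int) (fixtures : List (List (String × Int)))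
    (t : Int) (ht : t ∈ tids) :
    (pvB_teamRow p n (fixtures.foldl (pvB_collect p n tids) PySem.Dict.empty) t).items
      = (PySem.List.pyRange p (p + n) 1).map (fun gw => (gw, pvCnt fixtures t gw)) := by
  unfold pvB_teamRow
  have hhits : (fixtures.foldl (pvB_collect p n tids) PySem.Dict.empty).getD t []
      = fixtures.flatMap (pvHitsEv p n tids t) := by
    rw [pvB_collect_foldl]; simp
  rw [hhits]
  set hits := fixtures.flatMap (pvHitsEv p n tids t) with hhitsdef
  set evs := PySem.List.sorted hits (fun x => x) false with hevs
  have hperm : evs.Perm hits := PySem.List.sorted_perm hits (fun x => x) false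
  have hsor : evs.Pairwise (· ≤ ·) := by
    have := PySem.List.sorted_pairwise hits (fun x => x)
    simpa using this
  have hge0 : ∀ (j : ℕ) (hj : j < evs.length), (0 : Int) ≤ (j : Int) → p ≤ evs[j] := by
    intro j hj _
    exact pvHits_ge p n tids t fixtures _ (hperm.subset (List.getElem_mem hj))
  have hrow := pvB_row_fold evs hsor (p + n) (p + n - p).toNat p 0 PySem.Dict.empty rfl
    (le_refl 0) (by intro j hj hjlt; omega) hge0
  rw [hrow]
  have hfresh := PySem.Dict.items_foldl_insert_fresh (PySem.List.pyRange p (p + n) 1)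
    (fun x => x) (fun gw => ((evs.count gw : ℕ) : ℤ)) PySem.Dict.empty
    (by intro a _; simp) (by simpa using PySem.List.nodup_pyRange_one p (p + n))
  simp only at hfresh
  rw [hfresh]
  have hemp : (PySem.Dict.empty : PySem.Dict Int Int).items = [] := rfl
  rw [hemp, List.nil_append]
  refine List.map_congr_left ?_
  intro gw hgw
  have hc : ((evs.count gw : ℕ) : ℤ) = pvCnt fixtures t gw := by
    rw [hperm.count_eq]
    exact pvHits_count p n tids t ht fixtures gw hgw
  rw [hc]

lemma pvB_out_items (p n : Int) (tids : List Int) (hnd : tids.Nodup)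
    (evd : PySem.Dict Int (List Int)) :
    (tids.foldl (fun od t => od.insert t (pvB_teamRow p n evd t)) PySem.Dict.empty).items
      = tids.map (fun t => (t, pvB_teamRow p n evd t)) := by
  have h := PySem.Dict.items_foldl_insert_fresh tids (fun x => x)
    (fun t => pvB_teamRow p n evd t) PySem.Dict.empty
    (by intro a _; simp) (by simpa using hnd)
  simpa using h

-- ===== VERDICT (by name: the statement is the Claim_ definition above) =====
theorem detect_blank_double_gws_spec : Claim_equal_detect_blank_double_gws := by
  unfold Claim_equal_detect_blank_double_gws
  intro fixtures p n teams _ _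
  unfold Spec_detect_blank_double_gws
  simp only [detect_blank_double_gws, detect_blank_double_gws_alt]
  set tids := PySem.List.dedup ((teams.getD []).map Prod.fst) with htids
  have hnd : tids.Nodup := PySem.List.nodup_dedup _
  -- A's side equals the canonical table
  obtain ⟨hk, hik, hv⟩ := pvInv_foldl p n tids fixtures _ _ (pvInv_init p n tids hnd)
  set dfin := fixtures.foldl (pvA_step p n)
    (tids.foldl (fun d t => d.insert t (pvA_innerInit p n)) PySem.Dict.empty) with hdfin
  have hknd : dfin.keys.Nodup := by rw [hk]; exact hnd
  rw [PySem.Dict.items_eq_map_keys dfin hknd PySem.Dict.empty, hk, List.map_map]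
  -- B's side equals the same table
  rw [pvB_out_items p n tids hnd, List.map_map]
  refine List.map_congr_left ?_
  intro t ht
  simp only [Function.comp]
  refine congrArg _ ?_
  have hinner_nd : (dfin.getD t PySem.Dict.empty).keys.Nodup := by
    rw [hik t ht]; exact PySem.List.nodup_pyRange_one p (p + n)
  rw [PySem.Dict.items_eq_map_keys _ hinner_nd 0, hik t ht,
    pvB_teamRow_items p n tids fixtures t ht]
  refine List.map_congr_left ?_
  intro gw hg
  rw [hv t ht gw hg]
  ring_nf
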